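-- pv_equiv track=rewrite | github.com/vasu8480/leetcodes | python/ade.py | count
-- ===== SOURCE A (Python) =====
-- def count(N):
--     if N == 0:
--         return 1
--     a = 0
--     t = 1
--     while N:
--         if N % 2 == 0:
--             a += t
--         t = t * 2
--         N = N // 2
--     return a
-- ===== SOURCE B (Python) =====
-- def count(N):
--     if N == 0:
--         return 1
--     return (1 << N.bit_length()) - 1 - N
-- ===== Notes on version B (the rewrite author's own statement) =====
-- stated objective: simpler
-- what changed: replaces the bit-by-bit accumulation loop with the closed form (1 << N.bit_length()) - 1 - N (the all-ones mask of N's width minus N), keeping the N==0 -> 1 guard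
import Mathlib
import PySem

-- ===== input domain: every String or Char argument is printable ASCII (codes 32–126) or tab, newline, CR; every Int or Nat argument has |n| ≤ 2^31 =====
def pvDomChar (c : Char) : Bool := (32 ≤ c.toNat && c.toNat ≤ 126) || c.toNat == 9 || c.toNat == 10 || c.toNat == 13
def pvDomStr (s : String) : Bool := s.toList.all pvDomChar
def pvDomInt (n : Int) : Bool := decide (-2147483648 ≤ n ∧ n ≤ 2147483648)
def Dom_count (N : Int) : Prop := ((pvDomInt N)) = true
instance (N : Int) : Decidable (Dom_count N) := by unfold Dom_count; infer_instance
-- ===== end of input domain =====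

-- B replaces A's bit-by-bit accumulation loop with the closed form
-- (1 << N.bit_length()) - 1 - N, keeping the N == 0 -> 1 guard (objective: simpler).

-- ===== PORT A =====
-- while N: if N % 2 == 0: a += t; t *= 2; N //= 2
-- (guard 'N ≤ 0 → stop' only makes the recursion total: Python's loop runs while N ≠ 0,
-- and for the admitted inputs 0 < N this is the same condition; on N < 0 Python diverges,
-- excluded by Pre_count.)
def countLoop (a t N : Int) : Int :=
  if h : N ≤ 0 then a
  else countLoop (if PySem.Int.mod N 2 = 0 then a + t else a) (t * 2)
        (PySem.Int.floordiv N 2)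
  termination_by N.toNat
  decreasing_by
    have h2 : PySem.Int.floordiv N 2 = N / 2 :=
      PySem.Int.floordiv_eq_ediv_of_pos (by omega)
    rw [h2]; omega

def count (N : Int) : Int :=
  if N = 0 then 1
  else countLoop 0 1 N

-- ===== PORT B =====
def count_alt (N : Int) : Int :=
  if N = 0 then 1
  else ((1 <<< PySem.Int.bitLength N : Nat) : Int) - 1 - N

-- ===== PRECONDITION & SPEC =====
-- A's while loop never terminates for N < 0 (N // 2 floors, so N stays negative forever);
-- Pre_count keeps exactly the inputs on which the Python A returns.
def Pre_count (N : Int) : Prop := 0 ≤ N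
instance (N : Int) : Decidable (Pre_count N) := by unfold Pre_count; infer_instance
def pvWitness_count : Int := 6

def Spec_count (N : Int) (out : Int) : Prop := out = count_alt N
instance (N : Int) (out : Int) : Decidable (Spec_count N out) := by unfold Spec_count; infer_instance

-- ===== CLAIM (what is proved, stated in full; the proofs are below) =====
def Claim_equal_count : Prop := ∀ (N : Int), Dom_count N → Pre_count N → Spec_count N (count N)

-- ===== LEMMAS AND PROOFS =====

-- Loop invariant: for 0 < N the loop adds t times the "flipped bits" value
-- 2^bitLength(N) - 1 - N to the accumulator a.
theorem countLoop_eq (n : Nat) : ∀ (a t N : Int), 0 < N → N.toNat = n →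
    countLoop a t N = a + t * ((2 : Int) ^ PySem.Int.bitLength N - 1 - N) := by
  induction n using Nat.strong_induction_on with
  | _ n ih =>
    intro a t N hN hn
    rw [countLoop]
    have hng : ¬ N ≤ 0 := by omega
    simp only [hng, dite_false]
    have hfd : PySem.Int.floordiv N 2 = N / 2 :=
      PySem.Int.floordiv_eq_ediv_of_pos (by omega)
    have hmd : PySem.Int.mod N 2 = N % 2 :=
      PySem.Int.mod_eq_emod_of_pos (by omega)
    have hbl : PySem.Int.bitLength N = PySem.Int.bitLength (PySem.Int.floordiv N 2) + 1 :=
      PySem.Int.bitLength_of_pos hN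
    by_cases h1 : N / 2 = 0
    · -- N = 1
      have hN1 : N = 1 := by omega
      subst hN1
      have hb1 : PySem.Int.bitLength (1 : Int) = 1 := by decide
      rw [countLoop]
      norm_num [hfd, hmd, hb1]
    · have hpos : 0 < N / 2 := by omega
      have hlt : (N / 2).toNat < n := by omega
      rw [hfd] at hbl ⊢
      rw [ih (N / 2).toNat (by omega) _ _ _ hpos rfl]
      rw [hbl, hmd]
      have h2 : (2 : Int) ^ (PySem.Int.bitLength (N / 2) + 1)
          = 2 * 2 ^ PySem.Int.bitLength (N / 2) := by ring
      by_cases he : N % 2 = 0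
      · have hsplit : N = 2 * (N / 2) := by omega
        simp only [he, if_true]
        rw [h2]; linear_combination t * hsplit
      · have hsplit : N = 2 * (N / 2) + 1 := by omega
        simp only [he, if_false]
        rw [h2]; linear_combination t * hsplit

theorem count_spec : Claim_equal_count := by
  intro N _ hpre
  unfold Pre_count at hpre
  unfold Spec_count count count_alt
  by_cases h0 : N = 0
  · simp [h0]
  · have hN : 0 < N := by omega
    simp only [if_neg h0]
    rw [countLoop_eq N.toNat 0 1 N hN rfl]
    have : (((1 <<< PySem.Int.bitLength N : Nat) : Int)) = (2 : Int) ^ PySem.Int.bitLength N := by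
      push_cast [Nat.shiftLeft_eq]; ring
    rw [this]; ring
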